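-- pv_equiv track=rewrite | github.com/Akshay-s-raut/Python | Pygame/Graph/UI/main.py | getOption
-- ===== SOURCE A (Python) =====
-- def getOption(t):
--     option = -1
--     startx,starty = 10,100
--     height = 30
--     width = 100
--     for i in range(0,7):
--         if(t[0]>startx and t[0]<startx+width and t[1]>starty and t[1]<starty+height):
--             return i
--         starty = starty + 60
--     return -1
-- ===== SOURCE B (Python) =====
-- def getOption(t):
--     # Direct slot arithmetic instead of scanning the 7 rectangles.
--     if not (10 < t[0] < 110):
--         return -1
--     off = t[1] - 100
--     i = off // 60
--     if 0 <= i <= 6 and 60 * i < off < 60 * i + 30: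
--         return i
--     return -1
-- ===== Notes on version B (the rewrite author's own statement) =====
-- stated objective: simpler
-- what changed: Replaces the 7-iteration rectangle scan with a closed-form slot computation: floor-divide the y-offset by 60 and check the open slot interval.
import Mathlib
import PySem

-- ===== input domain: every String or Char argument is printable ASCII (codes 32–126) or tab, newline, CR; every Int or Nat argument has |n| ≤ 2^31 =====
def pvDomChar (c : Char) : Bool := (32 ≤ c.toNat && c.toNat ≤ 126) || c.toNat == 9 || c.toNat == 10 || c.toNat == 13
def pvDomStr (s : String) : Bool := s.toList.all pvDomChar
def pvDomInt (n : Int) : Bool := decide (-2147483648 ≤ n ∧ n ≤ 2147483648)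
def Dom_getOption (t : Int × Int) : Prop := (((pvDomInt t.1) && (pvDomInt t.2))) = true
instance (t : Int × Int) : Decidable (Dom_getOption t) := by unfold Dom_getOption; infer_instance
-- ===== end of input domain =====

-- B replaces A's 7-iteration rectangle scan with a closed-form floor-division slot test (objective: simpler).

-- ===== PORT A =====
-- the for-loop over range(0,7) with early return, carrying (i, starty); fuel = remaining iterations
def getOptionLoop (t : Int × Int) (i starty : Int) : Nat → Int
  | 0 => -1
  | fuel + 1 =>
    if t.1 > 10 ∧ t.1 < 10 + 100 ∧ t.2 > starty ∧ t.2 < starty + 30 then i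
    else getOptionLoop t (i + 1) (starty + 60) fuel

def getOption (t : Int × Int) : Int := getOptionLoop t 0 100 7

-- ===== PORT B =====
def getOption_alt (t : Int × Int) : Int :=
  if ¬ (10 < t.1 ∧ t.1 < 110) then -1
  else
    let off := t.2 - 100
    let i := PySem.Int.floordiv off 60
    if 0 ≤ i ∧ i ≤ 6 ∧ 60 * i < off ∧ off < 60 * i + 30 then i
    else -1

-- ===== PRECONDITION & SPEC =====
def Spec_getOption (t : Int × Int) (out : Int) : Prop := out = getOption_alt t
instance (t : Int × Int) (out : Int) : Decidable (Spec_getOption t out) := by unfold Spec_getOption; infer_instance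

-- ===== CLAIM (what is proved, stated in full; the proofs are below) =====
def Claim_equal_getOption : Prop := ∀ (t : Int × Int), Dom_getOption t → Spec_getOption t (getOption t)

-- ===== LEMMAS AND PROOFS =====
theorem getOption_eq_alt (t : Int × Int) : getOption t = getOption_alt t := by
  obtain ⟨x, y⟩ := t
  simp only [getOption, getOptionLoop, getOption_alt, PySem.Int.floordiv]
  have hdiv : (y - 100).fdiv 60 = (y - 100) / 60 := by rw [Int.fdiv_eq_ediv]; simp
  split_ifs <;> simp_all <;> omega

-- ===== VERDICT (by name: the statement is the Claim_ definition above) =====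
theorem getOption_spec : Claim_equal_getOption := by
  intro t _
  exact getOption_eq_alt t
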